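-- pv_equiv track=rewrite | github.com/Neob1844/sost-core | scripts/audit_miner_concentration.py | parse_merge_arg
-- ===== SOURCE A (Python) =====
-- from typing import Any, Dict, List, Optional, Tuple
--
-- def parse_merge_arg(specs: List[str]) -> Dict[str, str]:
--     """Parse --merge addr1=A,addr2=A specs into {addr -> label}."""
--     out: Dict[str, str] = {}
--     for spec in specs:
--         for pair in spec.split(","):
--             if "=" not in pair:
--                 continue
--             addr, label = pair.split("=", 1)
--             out[addr.strip()] = label.strip()
--     return out
-- ===== SOURCE B (Python) =====
-- from typing import Dict, List
--
-- def parse_merge_arg(specs: List[str]) -> Dict[str, str]: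
--     """Parse --merge addr1=A,addr2=A specs into {addr -> label}."""
--     out: Dict[str, str] = {}
--     for spec in specs:
--         addr: List[str] = []
--         label: List[str] = []
--         seen_eq = False
--         for ch in spec:
--             if ch == ',':
--                 if seen_eq:
--                     out["".join(addr).strip()] = "".join(label).strip()
--                 addr, label, seen_eq = [], [], False
--             elif ch == '=' and not seen_eq:
--                 seen_eq = True
--             elif seen_eq:
--                 label.append(ch)
--             else:
--                 addr.append(ch)
--         if seen_eq:
--             out["".join(addr).strip()] = "".join(label).strip()
--     return out
-- ===== Notes on version B (the rewrite author's own statement) =====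
-- stated objective: alternative
-- what changed: B replaces A's split-based nested loops with a single character-level state machine per spec: it never calls split, instead accumulating addr/label buffers and a seen-'=' flag, committing a pair on each ',' and at end of spec.
import Mathlib
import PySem

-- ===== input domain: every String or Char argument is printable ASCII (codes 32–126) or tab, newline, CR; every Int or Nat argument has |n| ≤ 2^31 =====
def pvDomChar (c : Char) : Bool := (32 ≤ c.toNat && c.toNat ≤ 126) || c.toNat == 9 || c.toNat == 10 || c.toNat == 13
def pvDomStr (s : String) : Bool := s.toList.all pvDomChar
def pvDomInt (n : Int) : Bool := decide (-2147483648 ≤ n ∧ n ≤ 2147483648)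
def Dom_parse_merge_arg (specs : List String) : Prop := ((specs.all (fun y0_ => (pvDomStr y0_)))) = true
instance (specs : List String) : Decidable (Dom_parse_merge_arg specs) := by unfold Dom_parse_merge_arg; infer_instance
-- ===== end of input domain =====

-- B replaces A's split()-based nested loops by a character-level state machine (no split calls); objective: alternative.

-- ===== PORT A =====
-- A: for spec in specs: for pair in spec.split(","): if "=" not in pair: continue; addr,label = pair.split("=",1); out[addr.strip()] = label.strip()
def parse_merge_arg (specs : List String) : List (String × String) :=
  (specs.foldl (fun out spec =>
    ((PySem.Str.split? spec ",").getD []).foldl (fun out pair =>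
      if PySem.Str.isIn "=" pair = false then out   -- "=" not in pair: continue
      else
        match PySem.Str.splitMax? pair "=" 1 with   -- pair.split("=", 1); guarded, always 2 pieces
        | some (addr :: label :: _) =>
            PySem.Dict.insert out (PySem.Str.strip addr) (PySem.Str.strip label)
        | _ => out) out) (PySem.Dict.empty : PySem.Dict String String)).items

-- ===== PORT B =====
-- B: per spec, scan characters with buffers addr/label and a seen_eq flag; commit on ',' and at end
-- commit: "if seen_eq: out[''.join(addr).strip()] = ''.join(label).strip()"
def pvCommit (out : PySem.Dict String String) (st : List Char × List Char × Bool) :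
    PySem.Dict String String :=
  if st.2.2 then
    PySem.Dict.insert out (PySem.Str.strip (String.ofList st.1)) (PySem.Str.strip (String.ofList st.2.1))
  else out

-- one character of Source B's inner loop
def pvScanStep (s : PySem.Dict String String × List Char × List Char × Bool) (ch : Char) :
    PySem.Dict String String × List Char × List Char × Bool :=
  if ch = ',' then (pvCommit s.1 s.2, [], [], false)
  else if ch = '=' && !s.2.2.2 then (s.1, s.2.1, s.2.2.1, true)
  else if s.2.2.2 then (s.1, s.2.1, s.2.2.1 ++ [ch], true)
  else (s.1, s.2.1 ++ [ch], s.2.2.1, s.2.2.2)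

def parse_merge_arg_alt (specs : List String) : List (String × String) :=
  (specs.foldl (fun out spec =>
    let st := spec.toList.foldl pvScanStep (out, [], [], false)
    pvCommit st.1 st.2) (PySem.Dict.empty : PySem.Dict String String)).items

-- ===== PRECONDITION & SPEC =====
def Spec_parse_merge_arg (specs : List String) (out : List (String × String)) : Prop := out = parse_merge_arg_alt specs
instance (specs : List String) (out : List (String × String)) : Decidable (Spec_parse_merge_arg specs out) := by unfold Spec_parse_merge_arg; infer_instance

-- ===== CLAIM (what is proved, stated in full; the proofs are below) =====
def Claim_equal_parse_merge_arg : Prop := ∀ (specs : List String), Dom_parse_merge_arg specs → Spec_parse_merge_arg specs (parse_merge_arg specs)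

-- ===== LEMMAS AND PROOFS =====

-- the non-comma part of pvScanStep, acting on the segment state only
def pvStep1 (st : List Char × List Char × Bool) (ch : Char) : List Char × List Char × Bool :=
  if ch = '=' && !st.2.2 then (st.1, st.2.1, true)
  else if st.2.2 then (st.1, st.2.1 ++ [ch], true)
  else (st.1 ++ [ch], st.2.1, st.2.2)

theorem pvScanStep_comma (out : PySem.Dict String String) (st : List Char × List Char × Bool) :
    pvScanStep (out, st) ',' = (pvCommit out st, [], [], false) := by
  simp [pvScanStep]

theorem pvScanStep_ne_comma (out : PySem.Dict String String) (st : List Char × List Char × Bool)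
    (ch : Char) (h : ch ≠ ',') :
    pvScanStep (out, st) ch = (out, pvStep1 st ch) := by
  obtain ⟨a, lab, seen⟩ := st
  simp only [pvScanStep, pvStep1, h, if_false]
  split
  · rfl
  · split <;> rfl

-- A-side step, phrased on the characters of one comma-piece
def pvAStep (out : PySem.Dict String String) (p : List Char) : PySem.Dict String String :=
  if '=' ∈ p then
    PySem.Dict.insert out (PySem.Str.strip (String.ofList (p.takeWhile (· ≠ '='))))
      (PySem.Str.strip (String.ofList ((p.dropWhile (· ≠ '=')).tail)))
  else out

-- reference splitter for the single-character separator ','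
def pvSplit1 : List Char → List (List Char)
  | [] => [[]]
  | c :: cs =>
      match pvSplit1 cs with
      | [] => []
      | p :: ps => if c = ',' then [] :: p :: ps else (c :: p) :: ps

theorem pvSplit1_ne_nil (l : List Char) : pvSplit1 l ≠ [] := by
  cases l with
  | nil => simp [pvSplit1]
  | cons c cs =>
      obtain ⟨p, ps, hps⟩ := List.exists_cons_of_ne_nil (pvSplit1_ne_nil cs)
      simp only [pvSplit1, hps]
      split <;> simp

theorem pvGo_eq_split1 (fuel : Nat) (l cur : List Char) (acc : List (List Char))
    (hf : l.length ≤ fuel) :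
    PySem.Chars.splitOn.go [','] fuel l cur acc =
      acc.reverse ++ (cur.reverse ++ (pvSplit1 l).headI) :: (pvSplit1 l).tail := by
  induction fuel generalizing l cur acc with
  | zero =>
      have hl : l = [] := List.eq_nil_of_length_eq_zero (Nat.le_zero.mp hf)
      subst hl
      simp [PySem.Chars.splitOn.go, pvSplit1]
  | succ fuel ih =>
      cases l with
      | nil => simp [PySem.Chars.splitOn.go, pvSplit1]
      | cons c rest =>
          have hr : rest.length ≤ fuel := by simpa using hf
          obtain ⟨p, ps, hps⟩ := List.exists_cons_of_ne_nil (pvSplit1_ne_nil rest)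
          by_cases hc : c = ','
          · subst hc
            have hpre : List.isPrefixOf [','] (',' :: rest) = true := by
              simp [List.isPrefixOf]
            rw [show PySem.Chars.splitOn.go [','] (fuel + 1) (',' :: rest) cur acc =
                  PySem.Chars.splitOn.go [','] fuel (List.drop [','].length (',' :: rest)) []
                    (cur.reverse :: acc) by
                  simp [PySem.Chars.splitOn.go, hpre]]
            simp only [List.length_cons, List.length_nil, List.drop_succ_cons, List.drop_zero]
            rw [ih rest [] (cur.reverse :: acc) hr]
            simp [pvSplit1, hps]
          · have hpre : List.isPrefixOf [','] (c :: rest) = false := by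
              simp [List.isPrefixOf]
              intro h; exact absurd h.symm hc
            rw [show PySem.Chars.splitOn.go [','] (fuel + 1) (c :: rest) cur acc =
                  PySem.Chars.splitOn.go [','] fuel rest (c :: cur) acc by
                  simp [PySem.Chars.splitOn.go, hpre]]
            rw [ih rest (c :: cur) acc hr]
            simp [pvSplit1, hps, hc]

theorem pvSplitOn_eq_split1 (l : List Char) : PySem.Chars.splitOn l [','] = pvSplit1 l := by
  unfold PySem.Chars.splitOn
  rw [pvGo_eq_split1 (l.length + 1) l [] [] (Nat.le_succ _)]
  obtain ⟨p, ps, hps⟩ := List.exists_cons_of_ne_nil (pvSplit1_ne_nil l)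
  simp [hps]

-- the pieces a string's split(",") yields, as Strings
theorem pv_pieces (s : String) :
    (PySem.Str.split? s ",").getD [] = (pvSplit1 s.toList).map String.ofList := by
  simp [PySem.Str.split?, PySem.Chars.split?, pvSplitOn_eq_split1]

-- splitOnMax.go with maxsplit exhausted returns the remainder as one last piece
theorem pvGoMax_zero (fuel : Nat) (l cur : List Char) (acc : List (List Char)) :
    PySem.Chars.splitOnMax.go ['='] fuel 0 l cur acc = acc.reverse ++ [cur.reverse ++ l] := by
  cases fuel with
  | zero => simp [PySem.Chars.splitOnMax.go]
  | succ fuel => cases l with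
    | nil => simp [PySem.Chars.splitOnMax.go]
    | cons c rest => simp [PySem.Chars.splitOnMax.go]

-- splitOnMax.go for sep "=", maxsplit 1: split at the first '=' if any
theorem pvGoMax_one (fuel : Nat) (l cur : List Char) (acc : List (List Char))
    (hf : l.length ≤ fuel) :
    PySem.Chars.splitOnMax.go ['='] fuel 1 l cur acc =
      if '=' ∈ l then
        acc.reverse ++ [cur.reverse ++ l.takeWhile (· ≠ '='), (l.dropWhile (· ≠ '=')).tail]
      else acc.reverse ++ [cur.reverse ++ l] := by
  induction fuel generalizing l cur acc with
  | zero =>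
      have hl : l = [] := List.eq_nil_of_length_eq_zero (Nat.le_zero.mp hf)
      subst hl
      simp [PySem.Chars.splitOnMax.go]
  | succ fuel ih =>
      cases l with
      | nil => simp [PySem.Chars.splitOnMax.go]
      | cons c rest =>
          have hr : rest.length ≤ fuel := by simpa using hf
          by_cases hc : c = '='
          · subst hc
            have hpre : List.isPrefixOf ['='] ('=' :: rest) = true := by
              simp [List.isPrefixOf]
            rw [show PySem.Chars.splitOnMax.go ['='] (fuel + 1) 1 ('=' :: rest) cur acc =
                  PySem.Chars.splitOnMax.go ['='] fuel 0 (List.drop ['='].length ('=' :: rest)) []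
                    (cur.reverse :: acc) by
                  simp [PySem.Chars.splitOnMax.go, hpre]]
            simp only [List.length_cons, List.length_nil, List.drop_succ_cons, List.drop_zero]
            rw [pvGoMax_zero]
            simp [List.takeWhile, List.dropWhile]
          · have hpre : List.isPrefixOf ['='] (c :: rest) = false := by
              simp [List.isPrefixOf]
              intro h; exact absurd h.symm hc
            rw [show PySem.Chars.splitOnMax.go ['='] (fuel + 1) 1 (c :: rest) cur acc =
                  PySem.Chars.splitOnMax.go ['='] fuel 1 rest (c :: cur) acc by
                  simp [PySem.Chars.splitOnMax.go, hpre]]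
            rw [ih rest (c :: cur) acc hr]
            by_cases hm : '=' ∈ rest
            · simp [hm, hc, List.takeWhile, List.dropWhile, Ne.symm hc]
            · simp [hm, Ne.symm hc]

theorem pvSplitOnMax_one (p : List Char) :
    PySem.Chars.splitOnMax p ['='] 1 =
      if '=' ∈ p then [p.takeWhile (· ≠ '='), (p.dropWhile (· ≠ '=')).tail] else [p] := by
  rw [show PySem.Chars.splitOnMax p ['='] 1 =
        PySem.Chars.splitOnMax.go ['='] (p.length + 1) 1 p [] [] by
      simp [PySem.Chars.splitOnMax]]
  rw [pvGoMax_one (p.length + 1) p [] [] (Nat.le_succ _)]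
  split <;> simp

-- A's inner body on the piece String.ofList p is pvAStep
theorem pvABody_eq (out : PySem.Dict String String) (p : List Char) :
    (if PySem.Str.isIn "=" (String.ofList p) = false then out
     else
       match PySem.Str.splitMax? (String.ofList p) "=" 1 with
       | some (addr :: label :: _) =>
           PySem.Dict.insert out (PySem.Str.strip addr) (PySem.Str.strip label)
       | _ => out) = pvAStep out p := by
  unfold pvAStep
  by_cases hm : '=' ∈ p
  · have hin : PySem.Chars.isIn ['='] p = true := by
      rw [PySem.Chars.isIn_iff_infix]
      exact (List.singleton_infix_iff '=' p).mpr hm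
    have hsp : PySem.Str.splitMax? (String.ofList p) "=" 1 =
        some [String.ofList (p.takeWhile (· ≠ '=')), String.ofList ((p.dropWhile (· ≠ '=')).tail)] := by
      simp [PySem.Str.splitMax?, PySem.Chars.splitMax?, String.toList_ofList, pvSplitOnMax_one, hm]
    simp [hin, hsp, hm, decide_not]
  · have hin : PySem.Chars.isIn ['='] p = false := by
      rw [PySem.Chars.isIn_eq_false_iff]
      exact fun h => hm ((List.singleton_infix_iff '=' p).mp h)
    simp [hin, hm]

-- the scan in the seen_eq state appends everything to label
theorem pvSegRun_seen (p : List Char) (a lab : List Char) :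
    p.foldl pvStep1 (a, lab, true) = (a, lab ++ p, true) := by
  induction p generalizing lab with
  | nil => simp
  | cons c cs ih => simp [pvStep1, ih]

-- scan of a piece without '=' appends everything to addr
theorem pvSegRun_no (p : List Char) (a lab : List Char) (h : '=' ∉ p) :
    p.foldl pvStep1 (a, lab, false) = (a ++ p, lab, false) := by
  induction p generalizing a with
  | nil => simp
  | cons c cs ih =>
      have hc : c ≠ '=' := fun hc => h (hc ▸ List.mem_cons_self)
      have hcs : '=' ∉ cs := fun hm => h (List.mem_cons_of_mem _ hm)
      simp only [List.foldl_cons, pvStep1]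
      simp [hc, ih _ hcs]

-- scan of a piece with '=' splits it at the first '='
theorem pvSegRun_yes (p : List Char) (a lab : List Char) (h : '=' ∈ p) :
    p.foldl pvStep1 (a, lab, false) =
      (a ++ p.takeWhile (· ≠ '='), lab ++ (p.dropWhile (· ≠ '=')).tail, true) := by
  induction p generalizing a with
  | nil => simp at h
  | cons c cs ih =>
      by_cases hc : c = '='
      · subst hc
        simp only [List.foldl_cons, pvStep1, List.takeWhile, List.dropWhile]
        simp [pvSegRun_seen]
      · have hcs : '=' ∈ cs := by
          cases List.mem_cons.mp h with
          | inl h' => exact absurd h'.symm hc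
          | inr h' => exact h'
        simp only [List.foldl_cons, pvStep1]
        simp only [hc, decide_false, Bool.false_and]
        simp [List.takeWhile, List.dropWhile, hc, ih _ hcs]

-- committing a fresh scan of one piece is A's step on that piece
theorem pvCommit_fresh (out : PySem.Dict String String) (p : List Char) :
    pvCommit out (p.foldl pvStep1 ([], [], false)) = pvAStep out p := by
  by_cases hm : '=' ∈ p
  · rw [pvSegRun_yes p [] [] hm]
    simp [pvCommit, pvAStep, hm]
  · rw [pvSegRun_no p [] [] hm]
    simp [pvCommit, pvAStep, hm]

-- main scan lemma: the char scan of l from any state equals folding pvAStep-like commits over the comma-pieces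
theorem pvScan_eq (l : List Char) (out : PySem.Dict String String)
    (st : List Char × List Char × Bool) :
    pvCommit (l.foldl pvScanStep (out, st)).1 (l.foldl pvScanStep (out, st)).2 =
      ((pvSplit1 l).tail).foldl (fun o p => pvCommit o (p.foldl pvStep1 ([], [], false)))
        (pvCommit out ((pvSplit1 l).headI.foldl pvStep1 st)) := by
  induction l generalizing out st with
  | nil => simp [pvSplit1]
  | cons c cs ih =>
      obtain ⟨p, ps, hps⟩ := List.exists_cons_of_ne_nil (pvSplit1_ne_nil cs)
      by_cases hc : c = ','
      · subst hc
        simp only [List.foldl_cons, pvScanStep_comma]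
        rw [ih (pvCommit out st) ([], [], false)]
        simp [pvSplit1, hps]
      · simp only [List.foldl_cons, pvScanStep_ne_comma out st c hc]
        rw [ih out (pvStep1 st c)]
        simp [pvSplit1, hps, hc]

-- per spec: B's scan equals A's fold over the comma-pieces
theorem pv_per_spec (spec : String) (out : PySem.Dict String String) :
    pvCommit (spec.toList.foldl pvScanStep (out, [], [], false)).1
      (spec.toList.foldl pvScanStep (out, [], [], false)).2 =
      (pvSplit1 spec.toList).foldl pvAStep out := by
  rw [pvScan_eq]
  obtain ⟨p, ps, hps⟩ := List.exists_cons_of_ne_nil (pvSplit1_ne_nil spec.toList)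
  rw [hps]
  simp only [List.headI, List.tail, List.foldl_cons]
  rw [pvCommit_fresh]
  exact PySem.List.foldl_congr_mem _ _ _ _ fun o q _ => pvCommit_fresh o q

-- ===== VERDICT (by name: the statement is the Claim_ definition above) =====
theorem parse_merge_arg_spec : Claim_equal_parse_merge_arg := by
  intro specs _
  unfold Spec_parse_merge_arg parse_merge_arg parse_merge_arg_alt
  have hspec : ∀ (out : PySem.Dict String String) (spec : String),
      ((PySem.Str.split? spec ",").getD []).foldl (fun out pair =>
        if PySem.Str.isIn "=" pair = false then out
        else
          match PySem.Str.splitMax? pair "=" 1 with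
          | some (addr :: label :: _) =>
              PySem.Dict.insert out (PySem.Str.strip addr) (PySem.Str.strip label)
          | _ => out) out =
      (let st := spec.toList.foldl pvScanStep (out, [], [], false)
       pvCommit st.1 st.2) := by
    intro out spec
    rw [pv_pieces, List.foldl_map]
    have h1 : ∀ (o : PySem.Dict String String) (p : List Char),
        (if PySem.Str.isIn "=" (String.ofList p) = false then o
         else
           match PySem.Str.splitMax? (String.ofList p) "=" 1 with
           | some (addr :: label :: _) =>
               PySem.Dict.insert o (PySem.Str.strip addr) (PySem.Str.strip label)
           | _ => o) = pvAStep o p := pvABody_eq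
    rw [PySem.List.foldl_congr_mem _ _ _ _ fun o p _ => h1 o p]
    exact (pv_per_spec spec out).symm
  rw [PySem.List.foldl_congr_mem _ _ _ _ fun o s _ => hspec o s]
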